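-- pv_equiv track=rewrite | github.com/xToriMicz/movie-info-app | utils.py | format_cast
-- ===== SOURCE A (Python) =====
-- def format_cast(cast_data: list) -> str:
--     """
--     จัดรูปแบบนักแสดง
--
--     Args:
--         cast_data: ข้อมูลนักแสดง
--
--     Returns:
--         ข้อความนักแสดง
--     """
--     if not cast_data:
--         return 'ไม่ระบุนักแสดง'
--
--     cast_names = []
--     for person in cast_data:
--         name = person.get('name', '')
--         character = person.get('character', '')
--         if name:
--             if character:
--                 cast_names.append(f"{name} ({character})")
--             else:
--                 cast_names.append(name)
--
--     return ', '.join(cast_names[:3])  # จำกัด 3 คน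
-- ===== SOURCE B (Python) =====
-- def format_cast(cast_data: list) -> str:
--     """Recursive re-implementation: builds the comma-joined string directly by
--     skipping to the next person with a name and recursing with one slot fewer;
--     no intermediate list, no slice-to-3, no join."""
--     if not cast_data:
--         return 'ไม่ระบุนักแสดง'
--     return _fc_go(3, cast_data)
--
--
-- def _fc_skip(people: list) -> list:
--     """Suffix of people starting at the first person with a nonempty name."""
--     k = 0
--     while k < len(people) and not people[k].get('name', ''):
--         k += 1
--     return people[k:]
--
--
-- def _fc_go(slots: int, people: list) -> str:
--     if slots == 0:
--         return ''
--     people = _fc_skip(people)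
--     if not people:
--         return ''
--     person = people[0]
--     name = person.get('name', '')
--     character = person.get('character', '')
--     entry = name + ' (' + character + ')' if character else name
--     tail = _fc_go(slots - 1, people[1:])
--     return entry if not tail else entry + ', ' + tail
-- ===== Notes on version B (the rewrite author's own statement) =====
-- stated objective: alternative
-- what changed: B is a recursion over the cast list that concatenates the final comma-joined string directly while finding the next person with a nonempty name and recursing with one slot fewer, in place of A's staged pipeline (build full list of formatted names, slice to 3, join).
import Mathlib
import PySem

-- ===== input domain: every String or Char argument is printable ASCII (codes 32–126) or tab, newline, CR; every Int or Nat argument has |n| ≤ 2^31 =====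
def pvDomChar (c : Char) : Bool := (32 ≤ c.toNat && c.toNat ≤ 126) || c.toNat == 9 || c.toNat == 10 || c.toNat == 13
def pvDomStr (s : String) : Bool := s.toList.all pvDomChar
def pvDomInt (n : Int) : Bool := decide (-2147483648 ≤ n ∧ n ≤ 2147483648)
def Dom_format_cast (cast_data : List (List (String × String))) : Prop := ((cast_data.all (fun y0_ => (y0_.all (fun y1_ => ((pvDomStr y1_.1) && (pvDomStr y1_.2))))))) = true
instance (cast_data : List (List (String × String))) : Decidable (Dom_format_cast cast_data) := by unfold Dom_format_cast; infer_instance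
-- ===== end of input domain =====

-- B replaces A's staged pipeline (build full list of formatted names, slice to 3, join)
-- by a recursion that concatenates the final comma-joined string directly while counting
-- down 3 remaining slots (objective: alternative).


-- ===== PORT A =====
-- one iteration of A's loop body
def fcStepA (acc : List String) (person : List (String × String)) : List String :=
  let name := PySem.Dict.getD (PySem.Dict.mk person) "name" ""
  let character := PySem.Dict.getD (PySem.Dict.mk person) "character" ""
  if name ≠ "" then
    if character ≠ "" then acc ++ [name ++ " (" ++ character ++ ")"]
    else acc ++ [name]
  else acc

def format_cast (cast_data : List (List (String × String))) : String :=
  if cast_data = [] then "ไม่ระบุนักแสดง"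
  else
    let cast_names := cast_data.foldl fcStepA []
    PySem.Str.join ", " (PySem.List.slice cast_names none (some 3))

-- ===== PORT B =====
-- Source B's _fc_skip: suffix of people starting at the first person with a nonempty name
def fcSkip : List (List (String × String)) → List (List (String × String))
  | [] => []
  | p :: rest =>
    if PySem.Dict.getD (PySem.Dict.mk p) "name" "" = "" then fcSkip rest else p :: rest

-- Source B's _fc_go: recursion building the joined string directly, one slot per entry
def fcGo : Nat → List (List (String × String)) → String
  | 0, _ => ""
  | k + 1, people =>
    match fcSkip people with
    | [] => ""
    | person :: rest =>
      let name := PySem.Dict.getD (PySem.Dict.mk person) "name" ""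
      let character := PySem.Dict.getD (PySem.Dict.mk person) "character" ""
      let entry := if character = "" then name else name ++ " (" ++ character ++ ")"
      let tail := fcGo k rest
      if tail = "" then entry else entry ++ ", " ++ tail

def format_cast_alt (cast_data : List (List (String × String))) : String :=
  if cast_data = [] then "ไม่ระบุนักแสดง"
  else fcGo 3 cast_data

-- ===== PRECONDITION & SPEC =====
def Spec_format_cast (cast_data : List (List (String × String))) (out : String) : Prop := out = format_cast_alt cast_data
instance (cast_data : List (List (String × String))) (out : String) : Decidable (Spec_format_cast cast_data out) := by unfold Spec_format_cast; infer_instance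

-- ===== CLAIM (what is proved, stated in full; the proofs are below) =====
def Claim_equal_format_cast : Prop := ∀ (cast_data : List (List (String × String))), Dom_format_cast cast_data → Spec_format_cast cast_data (format_cast cast_data)

-- ===== LEMMAS AND PROOFS =====

-- what A's loop contributes per person, as an Option
def fcEntry (person : List (String × String)) : Option String :=
  let name := PySem.Dict.getD (PySem.Dict.mk person) "name" ""
  let character := PySem.Dict.getD (PySem.Dict.mk person) "character" ""
  if name = "" then none
  else some (if character = "" then name else name ++ " (" ++ character ++ ")")

theorem fc_step_eq (acc : List String) (p : List (String × String)) :
    fcStepA acc p = acc ++ (fcEntry p).toList := by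
  by_cases hn : PySem.Dict.getD (PySem.Dict.mk p) "name" "" = ""
  · simp [fcStepA, fcEntry, hn]
  · by_cases hc : PySem.Dict.getD (PySem.Dict.mk p) "character" "" = ""
    · simp [fcStepA, fcEntry, hn, hc]
    · simp [fcStepA, fcEntry, hn, hc]

theorem fc_foldl_eq (xs : List (List (String × String))) (acc : List String) :
    xs.foldl fcStepA acc = acc ++ xs.filterMap fcEntry := by
  induction xs generalizing acc with
  | nil => simp
  | cons p rest ih =>
      rw [List.foldl_cons, fc_step_eq, ih, List.filterMap_cons]
      cases fcEntry p <;> simp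

theorem fc_join_cons_cons (a b : String) (l : List String) :
    PySem.Str.join ", " (a :: b :: l) = a ++ ", " ++ PySem.Str.join ", " (b :: l) := by
  simp only [PySem.Str.join, List.map_cons, PySem.Chars.join_cons_cons]
  have h : ∀ X : List Char, String.ofList (',' :: ' ' :: X) = ", " ++ String.ofList X := by
    intro X
    have : (',' :: ' ' :: X) = [',', ' '] ++ X := rfl
    rw [this, String.ofList_append]
  simp [String.ofList_append, h, String.append_assoc]

theorem fc_join_singleton (a : String) : PySem.Str.join ", " [a] = a := by
  simp [PySem.Str.join, PySem.Chars.join, List.intercalate]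

theorem fc_join_ne_empty (a : String) (h : a ≠ "") (l : List String) :
    PySem.Str.join ", " (a :: l) ≠ "" := by
  cases l with
  | nil => rw [fc_join_singleton]; exact h
  | cons b t =>
      rw [fc_join_cons_cons]
      intro he
      have h2 := congrArg String.toList he
      simp at h2

theorem fc_entry_ne_empty (p : List (String × String)) (s : String) (h : fcEntry p = some s) :
    s ≠ "" := by
  unfold fcEntry at h
  by_cases hn : PySem.Dict.getD (PySem.Dict.mk p) "name" "" = ""
  · simp [hn] at h
  · simp only [hn, if_false] at h
    by_cases hc : PySem.Dict.getD (PySem.Dict.mk p) "character" "" = ""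
    · simp [hc] at h; exact h ▸ hn
    · simp only [hc, if_false, Option.some.injEq] at h
      intro he
      rw [he] at h
      have h2 := congrArg String.toList h
      simp at h2

-- all entries produced by filterMap fcEntry are nonempty
theorem fc_filterMap_ne_empty (xs : List (List (String × String))) (s : String)
    (hs : s ∈ xs.filterMap fcEntry) : s ≠ "" := by
  rw [List.mem_filterMap] at hs
  obtain ⟨p, _, hp⟩ := hs
  exact fc_entry_ne_empty p s hp

-- skipping nameless people does not change the filtered entries
theorem fc_skip_filterMap (xs : List (List (String × String))) :
    (fcSkip xs).filterMap fcEntry = xs.filterMap fcEntry := by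
  induction xs with
  | nil => rfl
  | cons p rest ih =>
      by_cases hn : PySem.Dict.getD (PySem.Dict.mk p) "name" "" = ""
      · have he : fcEntry p = none := by simp [fcEntry, hn]
        simp [fcSkip, hn, he, ih]
      · simp [fcSkip, hn]

-- the head fcSkip stops at has a nonempty name
theorem fc_skip_head_name (xs p rest) (h : fcSkip xs = p :: rest) :
    PySem.Dict.getD (PySem.Dict.mk p) "name" "" ≠ "" := by
  induction xs with
  | nil => simp [fcSkip] at h
  | cons q tl ih =>
      by_cases hn : PySem.Dict.getD (PySem.Dict.mk q) "name" "" = ""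
      · rw [fcSkip, if_pos hn] at h; exact ih h
      · rw [fcSkip, if_neg hn] at h
        cases h; exact hn

-- B's recursion computes the join of the first k entries of A's filtered list
theorem fc_go_eq (k : Nat) (xs : List (List (String × String))) :
    fcGo k xs = PySem.Str.join ", " ((xs.filterMap fcEntry).take k) := by
  induction k generalizing xs with
  | zero => simp [fcGo, PySem.Str.join, PySem.Chars.join, List.intercalate]
  | succ k ih =>
      rw [← fc_skip_filterMap xs]
      cases hs : fcSkip xs with
      | nil => simp [fcGo, hs, PySem.Str.join, PySem.Chars.join, List.intercalate]
      | cons p rest =>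
          have hn := fc_skip_head_name xs p rest hs
          have he : fcEntry p = some (if PySem.Dict.getD (PySem.Dict.mk p) "character" "" = "" then PySem.Dict.getD (PySem.Dict.mk p) "name" "" else PySem.Dict.getD (PySem.Dict.mk p) "name" "" ++ " (" ++ PySem.Dict.getD (PySem.Dict.mk p) "character" "" ++ ")") := by
            simp [fcEntry, hn]
          rw [fcGo, hs]
          simp only [List.filterMap_cons, he, List.take_succ_cons, ih rest]
          cases hE : (rest.filterMap fcEntry).take k with
          | nil => simp [PySem.Str.join, PySem.Chars.join, List.intercalate]
          | cons b t =>
              have hb : b ≠ "" := by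
                apply fc_filterMap_ne_empty rest
                have : b ∈ (rest.filterMap fcEntry).take k := by rw [hE]; exact List.mem_cons_self
                exact List.mem_of_mem_take this
              rw [if_neg (fc_join_ne_empty b hb t), fc_join_cons_cons]

-- ===== VERDICT (by name: the statement is the Claim_ definition above) =====
theorem format_cast_spec : Claim_equal_format_cast := by
  intro cast_data _
  unfold Spec_format_cast format_cast format_cast_alt
  by_cases h : cast_data = []
  · simp [h]
  · simp only [h, if_false]
    rw [fc_foldl_eq cast_data [], List.nil_append]
    have h3 : PySem.List.slice (cast_data.filterMap fcEntry) none (some 3)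
        = (cast_data.filterMap fcEntry).take 3 := by
      simpa using PySem.List.slice_to_natCast (cast_data.filterMap fcEntry) 3
    rw [h3, ← fc_go_eq]
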